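-- pv_equiv track=rewrite | github.com/RazikaBengana/holbertonschool-interview | primegame/0-prime_game.py | determine_prime_game_winner
-- ===== SOURCE A (Python) =====
-- def determine_prime_game_winner(total_games, number_ranges):
--     """
--     Determine the winner of the Prime Count Game based on counting
--     prime numbers within specified ranges
--     """
--
--     if not number_ranges or total_games < 1:
--         return None
--
--     max_range_limit = max(number_ranges)
--     is_prime = [True for _ in range(max(max_range_limit + 1, 2))]
--
--     for i in range(2, int(pow(max_range_limit, 0.5)) + 1):
--         if not is_prime[i]:
--             continue
--         for j in range(i*i, max_range_limit + 1, i):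
--             is_prime[j] = False
--
--     is_prime[0] = is_prime[1] = False
--     cumulative_primes = 0
--
--     for i in range(len(is_prime)):
--         if is_prime[i]:
--             cumulative_primes += 1
--         is_prime[i] = cumulative_primes
--
--     maria_score = 0
--
--     for limit in number_ranges:
--         maria_score += is_prime[limit] % 2 == 1
--
--     if maria_score * 2 == len(number_ranges):
--         return None
--     if maria_score * 2 > len(number_ranges):
--         return "Maria"
--     return "Ben"
-- ===== SOURCE B (Python) =====
-- def _bisect_right(a, x):
--     lo, hi = 0, len(a)
--     while lo < hi:
--         mid = (lo + hi) // 2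
--         if x < a[mid]:
--             hi = mid
--         else:
--             lo = mid + 1
--     return lo
--
--
-- def determine_prime_game_winner(total_games, number_ranges):
--     if not number_ranges or total_games < 1:
--         return None
--     max_range_limit = max(number_ranges)
--     is_prime = [True for _ in range(max(max_range_limit + 1, 2))]
--     for i in range(2, int(pow(max_range_limit, 0.5)) + 1):
--         if not is_prime[i]:
--             continue
--         for j in range(i * i, max_range_limit + 1, i):
--             is_prime[j] = False
--     is_prime[0] = is_prime[1] = False
--     primes = [i for i in range(2, max_range_limit + 1) if is_prime[i]]
--     maria_score = 0
--     for limit in number_ranges: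
--         if _bisect_right(primes, limit) % 2 == 1:
--             maria_score += 1
--     if maria_score * 2 == len(number_ranges):
--         return None
--     if maria_score * 2 > len(number_ranges):
--         return "Maria"
--     return "Ben"
-- ===== Notes on version B (the rewrite author's own statement) =====
-- stated objective: alternative
-- what changed: A turns the sieve array into a cumulative prime-count array by an in-place prefix-sum pass and answers each query by direct (possibly negative) indexing; B instead extracts the sorted list of primes from the sieve and answers each query with a hand-written binary search (bisect_right), adding 1 to Maria's score when the count of primes <= limit is odd.
-- outside the precondition, e.g. on determine_prime_game_winner(1, [2, -1]): A returns 'Maria', B returns None; on determine_prime_game_winner(1, [-1]): A raises TypeError, B raises TypeError; on determine_prime_game_winner(1, [5, -100]): A raises IndexError, B returns None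
import Mathlib
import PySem

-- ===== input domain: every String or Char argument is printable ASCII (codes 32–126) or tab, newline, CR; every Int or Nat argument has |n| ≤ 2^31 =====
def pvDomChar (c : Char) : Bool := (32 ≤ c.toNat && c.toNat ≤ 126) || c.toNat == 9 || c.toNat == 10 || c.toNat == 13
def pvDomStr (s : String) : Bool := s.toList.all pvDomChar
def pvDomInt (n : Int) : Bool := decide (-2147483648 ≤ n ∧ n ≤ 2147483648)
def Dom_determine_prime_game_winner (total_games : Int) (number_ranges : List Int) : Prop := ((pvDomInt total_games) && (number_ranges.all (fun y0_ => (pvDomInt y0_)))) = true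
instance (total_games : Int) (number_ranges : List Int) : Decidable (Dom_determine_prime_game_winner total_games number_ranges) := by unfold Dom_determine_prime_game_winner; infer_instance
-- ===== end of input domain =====

-- B replaces A's in-place prefix-sum pass over the sieve (and O(1) indexed lookups) by a sorted
-- primes list queried with a hand-written binary search; alternative decomposition, same cost class.


-- ===== PORT A =====
-- int(pow(m, 0.5)): exact as Nat.sqrt for 0 ≤ m ≤ 2^31 (the double error of sqrt is far below the
-- distance to the neighbouring integers there); for m < 0 Python raises TypeError (excluded by Pre_).
def pvIsqrt (m : Int) : Int := Int.ofNat (Nat.sqrt m.toNat)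

-- the Eratosthenes sieve lines shared verbatim by Source A and Source B (both write is_prime[0..1] = False);
-- all indices i, j are ≥ 0 there, so .toNat indexing is exact.
def pvSieve (m : Int) : List Bool :=
  let ip0 := Array.replicate (max (m + 1) 2).toNat true
  let ip1 := (PySem.List.pyRange 2 (pvIsqrt m + 1) 1).foldl
    (fun ip i =>
      if ip.getD i.toNat false then
        (PySem.List.pyRange (i * i) (m + 1) i).foldl (fun a j => a.set! j.toNat false) ip
      else ip) ip0
  ((ip1.set! 0 false).set! 1 false).toList

-- A's cumulative pass 'for i in range(len(is_prime)): if is_prime[i]: cum += 1; is_prime[i] = cum'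
-- reads each entry before overwriting it, so it is this structural scan of the boolean list.
def pvCumLoop : List Bool → Int → List Int → List Int
  | [], _, acc => acc.reverse
  | b :: tl, s, acc => pvCumLoop tl (if b then s + 1 else s) ((if b then s + 1 else s) :: acc)

def pvCumBuild (bs : List Bool) (s : Int) : List Int := pvCumLoop bs s []

def determine_prime_game_winner (total_games : Int) (number_ranges : List Int) : Option String :=
  if number_ranges = [] ∨ total_games < 1 then none
  else
    let m := (PySem.List.max? number_ranges (fun x => x)).getD 0
    let c := pvCumBuild (pvSieve m) 0
    -- is_prime[limit] with Python's negative-index rule; .getD 0 only pads the IndexError case,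
    -- which Pre_ excludes
    let score := number_ranges.foldl
      (fun s t => s + (if PySem.Int.mod ((PySem.List.pyGet? c t).getD 0) 2 == 1 then 1 else 0))
      (0 : Int)
    if score * 2 = (number_ranges.length : Int) then none
    else if score * 2 > (number_ranges.length : Int) then some "Maria"
    else some "Ben"

-- ===== PORT B =====
def determine_prime_game_winner_alt (total_games : Int) (number_ranges : List Int) : Option String :=
  if number_ranges = [] ∨ total_games < 1 then none
  else
    let m := (PySem.List.max? number_ranges (fun x => x)).getD 0
    let ip := pvSieve m
    let primes := (PySem.List.pyRange 2 (m + 1) 1).filter (fun i => ip.getD i.toNat false)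
    -- Source B's hand-written _bisect_right is exactly CPython's bisect_right loop = PySem.List.bisectRight
    let score := number_ranges.foldl
      (fun s t => if PySem.Int.mod (Int.ofNat (PySem.List.bisectRight primes t)) 2 == 1 then s + 1 else s)
      (0 : Int)
    if score * 2 = (number_ranges.length : Int) then none
    else if score * 2 > (number_ranges.length : Int) then some "Maria"
    else some "Ben"

-- ===== PRECONDITION & SPEC =====
-- Pre_ excludes nonempty ranges (with total_games ≥ 1) containing a negative limit: a negative
-- round count is outside the game's meaning, and there A raises TypeError (all limits negative)
-- or IndexError (a limit below -len), or returns a value produced by Python's accidental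
-- negative-index wraparound into the cumulative array; B counts zero primes below any negative limit.
def Pre_determine_prime_game_winner (total_games : Int) (number_ranges : List Int) : Prop :=
  number_ranges = [] ∨ total_games < 1 ∨ ∀ x ∈ number_ranges, 0 ≤ x
instance (total_games : Int) (number_ranges : List Int) : Decidable (Pre_determine_prime_game_winner total_games number_ranges) := by unfold Pre_determine_prime_game_winner; infer_instance

def pvWitness_determine_prime_game_winner : Int × List Int := (2, [4, 5, 7])

def Spec_determine_prime_game_winner (total_games : Int) (number_ranges : List Int) (out : Option String) : Prop := out = determine_prime_game_winner_alt total_games number_ranges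
instance (total_games : Int) (number_ranges : List Int) (out : Option String) : Decidable (Spec_determine_prime_game_winner total_games number_ranges out) := by unfold Spec_determine_prime_game_winner; infer_instance

-- ===== CLAIM (what is proved, stated in full; the proofs are below) =====
def Claim_equal_determine_prime_game_winner : Prop := ∀ (total_games : Int) (number_ranges : List Int), Dom_determine_prime_game_winner total_games number_ranges → Pre_determine_prime_game_winner total_games number_ranges → Spec_determine_prime_game_winner total_games number_ranges (determine_prime_game_winner total_games number_ranges)

-- ===== LEMMAS AND PROOFS =====

-- lengths are preserved through the sieve's writes
theorem pv_len_foldl_set (js : List Int) (a : Array Bool) :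
    (js.foldl (fun a j => a.set! j.toNat false) a).size = a.size := by
  induction js generalizing a with
  | nil => rfl
  | cons j tl ih => simpa [List.foldl_cons] using ih (a.set! j.toNat false)

theorem pv_len_outer (is : List Int) (m : Int) (a : Array Bool) :
    (is.foldl (fun ip i =>
      if ip.getD i.toNat false then
        (PySem.List.pyRange (i * i) (m + 1) i).foldl (fun a j => a.set! j.toNat false) ip
      else ip) a).size = a.size := by
  induction is generalizing a with
  | nil => rfl
  | cons i tl ih =>
    rw [List.foldl_cons, ih]
    split
    · exact pv_len_foldl_set _ _
    · rfl

theorem pvSieve_length (m : Int) : (pvSieve m).length = (max (m + 1) 2).toNat := by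
  unfold pvSieve
  rw [Array.length_toList, Array.size_set!, Array.size_set!, pv_len_outer, Array.size_replicate]

theorem pv_set01_getD (x : Array Bool) (h : 2 ≤ x.size) :
    ((x.set! 0 false).set! 1 false).toList.getD 0 false = false ∧
    ((x.set! 0 false).set! 1 false).toList.getD 1 false = false := by
  constructor <;>
    simp [Array.set!_eq_setIfInBounds, List.getD_eq_getElem?_getD, Array.getElem?_toList, Array.getElem?_setIfInBounds,
      show 0 < x.size by omega, show 1 < x.size by omega]

theorem pv_inner_two_le (m : Int) :
    2 ≤ ((PySem.List.pyRange 2 (pvIsqrt m + 1) 1).foldl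
      (fun ip i =>
        if ip.getD i.toNat false then
          (PySem.List.pyRange (i * i) (m + 1) i).foldl (fun a j => a.set! j.toNat false) ip
        else ip) (Array.replicate (max (m + 1) 2).toNat true)).size := by
  rw [pv_len_outer, Array.size_replicate]; omega

theorem pvSieve_getD_zero (m : Int) : (pvSieve m).getD 0 false = false :=
  (pv_set01_getD _ (pv_inner_two_le m)).1

theorem pvSieve_getD_one (m : Int) : (pvSieve m).getD 1 false = false :=
  (pv_set01_getD _ (pv_inner_two_le m)).2

-- pvCumBuild entries
def pvCumSpec : List Bool → Int → List Int
  | [], _ => []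
  | b :: tl, s => (if b then s + 1 else s) :: pvCumSpec tl (if b then s + 1 else s)

theorem pvCumLoop_eq (bs : List Bool) (s : Int) (acc : List Int) :
    pvCumLoop bs s acc = acc.reverse ++ pvCumSpec bs s := by
  induction bs generalizing s acc with
  | nil => simp [pvCumLoop, pvCumSpec]
  | cons b tl ih => simp [pvCumLoop, pvCumSpec, ih]

theorem pvCumSpec_getElem? (bs : List Bool) (s : Int) (k : Nat) (hk : k < bs.length) :
    (pvCumSpec bs s)[k]? = some (s + ((bs.take (k + 1)).count true : Int)) := by
  induction bs generalizing s k with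
  | nil => simp at hk
  | cons b tl ih =>
    cases k with
    | zero => cases b <;> simp [pvCumSpec, List.count_cons]
    | succ k =>
      have hk' : k < tl.length := by simpa using hk
      cases b <;>
        simp [pvCumSpec, ih _ _ hk', List.count_cons, List.take_succ_cons] <;> ring_nf

theorem pvCumBuild_getElem? (bs : List Bool) (s : Int) (k : Nat) (hk : k < bs.length) :
    (pvCumBuild bs s)[k]? = some (s + ((bs.take (k + 1)).count true : Int)) := by
  rw [pvCumBuild, pvCumLoop_eq]
  simpa using pvCumSpec_getElem? bs s k hk

-- count of trues in a prefix = countP over Nat indices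
theorem pv_count_take (bs : List Bool) (k : Nat) (hk : k ≤ bs.length) :
    (bs.take k).count true = (List.range k).countP (fun i => bs.getD i false) := by
  induction k with
  | zero => simp
  | succ k ih =>
    have hk' : k ≤ bs.length := Nat.le_of_succ_le hk
    have hkl : k < bs.length := hk
    rw [List.take_succ, List.range_succ, List.countP_append, List.count_append, ← ih hk',
        List.getElem?_eq_getElem hkl]
    have hg : bs.getD k false = bs[k] := by
      simp [List.getD_eq_getElem?_getD, List.getElem?_eq_getElem hkl]
    cases hb : bs[k] <;> simp [hg, hb, List.getElem?_eq_getElem hkl]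

-- drop a bound that exceeds the range
theorem pv_countP_range_and_lt (q : Nat → Bool) (c n : Nat) (h : c ≤ n) :
    (List.range n).countP (fun k => q k && decide (k < c)) = (List.range c).countP q := by
  induction n with
  | zero =>
    have : c = 0 := by omega
    subst this
    simp
  | succ n ih =>
    rcases Nat.lt_or_ge c (n + 1) with h1 | h1
    · have hc : c ≤ n := by omega
      rw [List.range_succ, List.countP_append, ih hc]
      simp [Nat.not_lt.mpr hc]
    · have : c = n + 1 := by omega
      subst this
      apply List.countP_congr
      intro k hkm
      have : k < n + 1 := List.mem_range.mp hkm
      simp [this]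

-- peel the first two indices off a countP over range (c+2)
theorem pv_countP_range_shift2 (q : Nat → Bool) (c : Nat) (h0 : q 0 = false) (h1 : q 1 = false) :
    (List.range (c + 2)).countP q = (List.range c).countP (fun k => q (k + 2)) := by
  rw [List.range_succ_eq_map, List.range_succ_eq_map]
  simp [h0, h1, List.countP_map]
  apply List.countP_congr
  intro k _
  rfl

-- a list whose truth values split at r has countP = r
theorem pv_countP_split (a : List Int) (p : Int → Bool) (r : Nat) (hr : r ≤ a.length)
    (h1 : ∀ (j : Nat) (hj : j < a.length), j < r → p a[j] = true)
    (h2 : ∀ (j : Nat) (hj : j < a.length), r ≤ j → p a[j] = false) :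
    a.countP p = r := by
  induction a generalizing r with
  | nil =>
    have : r = 0 := Nat.le_zero.mp (by simpa using hr)
    simp [this]
  | cons x tl ih =>
    cases r with
    | zero =>
      have hx : p x = false := h2 0 (by simp) (Nat.zero_le 0)
      have : tl.countP p = 0 := ih 0 (Nat.zero_le _)
        (by intro j hj hj0; omega)
        (by intro j hj _; simpa using h2 (j + 1) (by simpa using Nat.succ_lt_succ hj) (Nat.zero_le _))
      simp [List.countP_cons, hx, this]
    | succ r =>
      have hx : p x = true := h1 0 (by simp) (Nat.succ_pos r)
      have htl : tl.countP p = r := ih r (by simpa using hr)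
        (by intro j hj hjr; simpa using h1 (j + 1) (by simpa using Nat.succ_lt_succ hj) (by omega))
        (by intro j hj hjr; simpa using h2 (j + 1) (by simpa using Nat.succ_lt_succ hj) (by omega))
      simp [List.countP_cons, hx, htl]

-- bisectRight on a sorted list counts the elements ≤ x
theorem pv_bisectRight_eq_countP (a : List Int) (x : Int)
    (hs : a.Pairwise (· ≤ ·)) :
    PySem.List.bisectRight a x = a.countP (fun y => decide (y ≤ x)) := by
  obtain ⟨hle, hlt, hgt⟩ := PySem.List.bisectRight_spec a x hs
  exact (pv_countP_split a _ _ hle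
    (fun j hj hjr => by simpa using hlt j hj hjr)
    (fun j hj hjr => by simpa using not_le.mpr (hgt j hj hjr))).symm

-- THE KEY BRIDGE: prefix count of trues in bs up to t = number of kept indices ≤ t
theorem pv_key (bs : List Bool) (m t : Int)
    (hb0 : bs.getD 0 false = false) (hb1 : bs.getD 1 false = false)
    (h0t : 0 ≤ t) (htm : t ≤ m) (hlen : t.toNat < bs.length) :
    ((bs.take (t.toNat + 1)).count true)
      = ((PySem.List.pyRange 2 (m + 1) 1).filter
          (fun i => bs.getD i.toNat false)).countP (fun p => decide (p ≤ t)) := by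
  have hTake : (bs.take (t.toNat + 1)).count true
      = (List.range (t.toNat + 1)).countP (fun i => bs.getD i false) :=
    pv_count_take bs (t.toNat + 1) (by omega)
  rcases le_or_gt t 1 with hle | hgt
  · -- t ∈ {0, 1}: both sides are 0
    have hl : (bs.take (t.toNat + 1)).count true = 0 := by
      have : t = 0 ∨ t = 1 := by omega
      rcases this with h | h <;> subst h <;>
        simp_all [List.range_succ, List.countP_append]
    rw [hl]
    symm
    rw [List.countP_eq_zero]
    intro a ha
    have ha2 : 2 ≤ a := (PySem.List.mem_pyRange_one.mp (List.mem_of_mem_filter ha)).1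
    simp
    omega
  · -- 2 ≤ t
    rw [List.countP_filter, PySem.List.pyRange_one, List.countP_map]
    have hc2 : t.toNat - 1 + 2 = t.toNat + 1 := by omega
    rw [hTake, ← hc2, pv_countP_range_shift2 _ _ hb0 hb1]
    have hstep : ∀ k ∈ List.range (m + 1 - 2).toNat,
        ((fun i => decide (i ≤ t) && bs.getD i.toNat false) ∘ (fun k : Nat => 2 + (k : Int))) k = true
          ↔ (fun k : Nat => bs.getD (k + 2) false && decide (k < t.toNat - 1)) k = true := by
      intro k _
      have h1 : ((2 : Int) + (k : Int)).toNat = k + 2 := by omega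
      have h2 : (decide ((2 : Int) + (k : Int) ≤ t)) = decide (k < t.toNat - 1) := by
        by_cases h : (2 : Int) + (k : Int) ≤ t <;> simp [h] <;> omega
      simp only [Function.comp, h1, h2, Bool.and_comm]
    rw [List.countP_congr hstep,
      pv_countP_range_and_lt (fun k => bs.getD (k + 2) false) (t.toNat - 1) (m + 1 - 2).toNat
        (by omega)]

-- ===== VERDICT (by name: the statement is the Claim_ definition above) =====
theorem pv_scores_eq (l : List Int) (m : Int)
    (hpos : ∀ x ∈ l, 0 ≤ x) (hmax : ∀ x ∈ l, x ≤ m) :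
    l.foldl (fun s t => s + (if PySem.Int.mod
        ((PySem.List.pyGet? (pvCumBuild (pvSieve m) 0) t).getD 0) 2 == 1 then 1 else 0)) (0 : Int)
    = l.foldl (fun s t => if PySem.Int.mod
        (Int.ofNat (PySem.List.bisectRight
          ((PySem.List.pyRange 2 (m + 1) 1).filter (fun i => (pvSieve m).getD i.toNat false)) t))
        2 == 1 then s + 1 else s) (0 : Int) := by
  apply PySem.List.foldl_congr_mem
  intro s t htl
  have h0t : 0 ≤ t := hpos t htl
  have htm : t ≤ m := hmax t htl
  have hlt : t.toNat < (pvSieve m).length := by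
    rw [pvSieve_length]; omega
  have hA : PySem.List.pyGet? (pvCumBuild (pvSieve m) 0) t
      = some ((0 : Int) + (((pvSieve m).take (t.toNat + 1)).count true : Int)) := by
    rw [PySem.List.pyGet?_of_nonneg _ h0t]
    exact pvCumBuild_getElem? _ 0 _ hlt
  have hpw : (((PySem.List.pyRange 2 (m + 1) 1).filter
      (fun i => (pvSieve m).getD i.toNat false))).Pairwise (· ≤ ·) :=
    ((PySem.List.pairwise_lt_pyRange_one 2 (m + 1)).imp Int.le_of_lt).filter _
  have hB : PySem.List.bisectRight
      ((PySem.List.pyRange 2 (m + 1) 1).filter (fun i => (pvSieve m).getD i.toNat false)) t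
      = ((PySem.List.pyRange 2 (m + 1) 1).filter
          (fun i => (pvSieve m).getD i.toNat false)).countP (fun y => decide (y ≤ t)) :=
    pv_bisectRight_eq_countP _ _ hpw
  have hkey := pv_key (pvSieve m) m t (pvSieve_getD_zero m) (pvSieve_getD_one m) h0t htm hlt
  rw [hA, hB, ← hkey]
  simp only [Option.getD_some, zero_add, Int.ofNat_eq_natCast]
  split <;> simp

theorem pv_tail (a b : Int) (n : Nat) (h : a = b) :
    (if a * 2 = (n : Int) then (none : Option String)
     else if a * 2 > (n : Int) then some "Maria" else some "Ben")
    = (if b * 2 = (n : Int) then none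
       else if b * 2 > (n : Int) then some "Maria" else some "Ben") := by
  rw [h]

theorem determine_prime_game_winner_spec : Claim_equal_determine_prime_game_winner := by
  intro tg l hDom hPre
  unfold Spec_determine_prime_game_winner
  unfold determine_prime_game_winner determine_prime_game_winner_alt
  by_cases hg : l = [] ∨ tg < 1
  · simp [hg]
  · have hne : l ≠ [] := fun h => hg (Or.inl h)
    have hpos : ∀ x ∈ l, 0 ≤ x := by
      rcases hPre with h | h | h
      · exact absurd (Or.inl h) hg
      · exact absurd (Or.inr h) hg
      · exact h
    rw [if_neg hg, if_neg hg]
    cases hmx : PySem.List.max? l (fun x => x) with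
    | none =>
      exact absurd ((PySem.List.max?_eq_none_iff _ _).mp hmx) hne
    | some m =>
      have hmax : ∀ x ∈ l, x ≤ m := PySem.List.max?_isMax hmx
      simp only [hmx, Option.getD_some]
      exact pv_tail _ _ _ (pv_scores_eq l m hpos hmax)
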